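-- pv_equiv track=rewrite | github.com/Impalerzx/password-generator-strength-checker | password_checker.py | _penalty_for_repeated_sequences
-- ===== SOURCE A (Python) =====
-- def _penalty_for_repeated_sequences(password: str) -> int:
--     """
--     Simple penalty for repeated characters in a row.
--     For every sequence of length > 2, subtract some points.
--     """
--     if not password:
--         return 0
--
--     penalty = 0
--     current_char = password[0]
--     current_run = 1
--
--     for ch in password[1:]:
--         if ch == current_char:
--             current_run += 1
--         else:
--             if current_run >= 3:
--                 penalty += (current_run - 2) * 2
--             current_char = ch
--             current_run = 1
--
--     if current_run >= 3:
--         penalty += (current_run - 2) * 2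
--
--     return penalty
-- ===== SOURCE B (Python) =====
-- def _penalty_for_repeated_sequences(password: str) -> int:
--     """Closed-form reformulation: a run of length L >= 3 contributes (L-2)*2,
--     and L-2 is exactly the number of positions whose three consecutive
--     characters are equal, so the penalty is twice the count of equal
--     consecutive triples. No run tracking, no state, no flush."""
--     return 2 * sum(1 for a, b, c in zip(password, password[1:], password[2:]) if a == b == c)
-- ===== Notes on version B (the rewrite author's own statement) =====
-- stated objective: simpler
-- what changed: B replaces A's run-length state machine (current_char/current_run with a duplicated post-loop flush) by a closed-form count: the penalty equals twice the number of equal consecutive character triples, computed by one zip over three offsets of the string.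
import Mathlib
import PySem

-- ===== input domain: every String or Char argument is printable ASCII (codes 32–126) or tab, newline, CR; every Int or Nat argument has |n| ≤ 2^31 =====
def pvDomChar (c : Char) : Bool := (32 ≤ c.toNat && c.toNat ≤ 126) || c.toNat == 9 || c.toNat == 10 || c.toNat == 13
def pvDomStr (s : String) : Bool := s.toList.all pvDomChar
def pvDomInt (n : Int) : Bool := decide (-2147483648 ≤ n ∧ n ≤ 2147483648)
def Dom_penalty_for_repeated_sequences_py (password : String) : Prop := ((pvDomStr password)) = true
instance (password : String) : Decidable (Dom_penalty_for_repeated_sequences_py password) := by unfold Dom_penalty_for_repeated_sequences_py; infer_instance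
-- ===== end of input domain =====

-- B replaces A's run-length state machine by a closed-form count: penalty = 2 × (number of equal consecutive triples); simpler, same O(n) cost.


-- ===== PORT A =====
-- A: state machine over the tail, state (penalty, current_char, current_run), final flush after the loop.
def penalty_for_repeated_sequences_py (password : String) : Int :=
  match password.toList with
  | [] => 0
  | c :: rest =>
    let st := rest.foldl
      (fun (st : Int × Char × Int) ch =>
        if ch = st.2.1 then (st.1, st.2.1, st.2.2 + 1)
        else ((if st.2.2 ≥ 3 then st.1 + (st.2.2 - 2) * 2 else st.1), ch, 1))
      (0, c, 1)
    if st.2.2 ≥ 3 then st.1 + (st.2.2 - 2) * 2 else st.1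

-- ===== PORT B =====
-- B: 2 * sum(1 for a,b,c in zip(password, password[1:], password[2:]) if a==b==c)
def penalty_for_repeated_sequences_py_alt (password : String) : Int :=
  let l := password.toList
  2 * ((l.zip (l.drop 1)).zip (l.drop 2)).foldl
        (fun (acc : Int) p => if p.1.1 = p.1.2 ∧ p.1.2 = p.2 then acc + 1 else acc) 0

-- ===== PRECONDITION & SPEC =====
def Spec_penalty_for_repeated_sequences_py (password : String) (out : Int) : Prop := out = penalty_for_repeated_sequences_py_alt password
instance (password : String) (out : Int) : Decidable (Spec_penalty_for_repeated_sequences_py password out) := by unfold Spec_penalty_for_repeated_sequences_py; infer_instance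

-- ===== CLAIM (what is proved, stated in full; the proofs are below) =====
def Claim_equal_penalty_for_repeated_sequences_py : Prop := ∀ (password : String), Dom_penalty_for_repeated_sequences_py password → Spec_penalty_for_repeated_sequences_py password (penalty_for_repeated_sequences_py password)

-- ===== LEMMAS AND PROOFS =====

-- Count of equal consecutive triples in a list, by structural recursion.
def pvTC : List Char → Int
  | a :: b :: c :: r => (if a = b ∧ b = c then 1 else 0) + pvTC (b :: c :: r)
  | _ => 0

-- Triple-extension counter: c = previous char, b = "the two previous chars were equal".
def pvW (c : Char) (b : Bool) : List Char → Int
  | [] => 0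
  | x :: xs => (if x = c ∧ b = true then 1 else 0) + (if x = c then pvW c true xs else pvW x false xs)

theorem pvW_tc (l : List Char) : ∀ (a b : Char), pvW b (decide (a = b)) l = pvTC (a :: b :: l) := by
  induction l with
  | nil => intro a b; simp [pvW, pvTC]
  | cons x xs ih =>
    intro a b
    by_cases h : x = b
    · subst h
      simp only [pvW, decide_eq_true_eq]
      rw [show (pvW x true xs) = pvW x (decide (x = x)) xs by simp, ih]
      simp only [pvTC]
      split_ifs <;> simp_all
    · simp only [pvW, if_neg h]
      have hbx : decide (b = x) = false := decide_eq_false (fun h' => h h'.symm)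
      rw [show (pvW x false xs) = pvW x (decide (b = x)) xs by rw [hbx], ih]
      simp only [pvTC]
      have : ¬ (a = b ∧ b = x) := fun ⟨_, h2⟩ => h h2.symm
      split_ifs <;> simp_all

theorem pvW_false (c : Char) (l : List Char) : pvW c false l = pvTC (c :: l) := by
  cases l with
  | nil => simp [pvW, pvTC]
  | cons x xs =>
    simp only [pvW, Bool.false_eq_true, and_false, if_false, zero_add]
    by_cases h : x = c
    · subst h
      rw [if_pos rfl, show (pvW x true xs) = pvW x (decide (x = x)) xs by simp, pvW_tc]
    · have hcx : decide (c = x) = false := decide_eq_false (fun h' => h h'.symm)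
      rw [if_neg h, show (pvW x false xs) = pvW x (decide (c = x)) xs by rw [hcx], pvW_tc]

-- A's loop from state (pen, c, run) followed by the flush.
theorem pvLoop_eq (l : List Char) : ∀ (pen : Int) (c : Char) (run : Int), 1 ≤ run →
    (let st := l.foldl
      (fun (st : Int × Char × Int) ch =>
        if ch = st.2.1 then (st.1, st.2.1, st.2.2 + 1)
        else ((if st.2.2 ≥ 3 then st.1 + (st.2.2 - 2) * 2 else st.1), ch, 1))
      (pen, c, run);
     if st.2.2 ≥ 3 then st.1 + (st.2.2 - 2) * 2 else st.1)
    = pen + (if run ≥ 3 then (run - 2) * 2 else 0) + 2 * pvW c (decide (run ≥ 2)) l := by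
  induction l with
  | nil =>
    intro pen c run _
    simp only [List.foldl_nil, pvW]
    split_ifs <;> ring
  | cons x xs ih =>
    intro pen c run hrun
    by_cases h : x = c
    · subst h
      simp only [List.foldl_cons]
      rw [if_pos trivial, ih pen x (run + 1) (by omega)]
      simp only [pvW, decide_eq_true_eq, true_and]
      have h2 : decide (run + 1 ≥ 2) = true := by simp; omega
      rw [h2]
      split_ifs <;> omega
    · simp only [List.foldl_cons, if_neg h]
      rw [ih _ x 1 (by omega)]
      simp only [pvW, if_neg h]
      have : ¬ (x = c ∧ decide (run ≥ 2) = true) := fun ⟨hx, _⟩ => h hx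
      rw [if_neg this]
      have h1 : decide ((1:Int) ≥ 2) = false := by decide
      rw [h1]
      split_ifs <;> omega

-- Shift the accumulator out of B's fold.
theorem pvFold_shift (zs : List ((Char × Char) × Char)) : ∀ (n : Int),
    zs.foldl (fun (acc : Int) p => if p.1.1 = p.1.2 ∧ p.1.2 = p.2 then acc + 1 else acc) n
    = n + zs.foldl (fun (acc : Int) p => if p.1.1 = p.1.2 ∧ p.1.2 = p.2 then acc + 1 else acc) 0 := by
  induction zs with
  | nil => intro n; simp
  | cons z zs ih =>
    intro n
    simp only [List.foldl_cons]
    rw [ih (if z.1.1 = z.1.2 ∧ z.1.2 = z.2 then n + 1 else n),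
        ih (if z.1.1 = z.1.2 ∧ z.1.2 = z.2 then 0 + 1 else 0)]
    split_ifs <;> ring

-- B's zip-fold equals the structural triple count.
theorem pvZip_tc (l : List Char) :
    ((l.zip (l.drop 1)).zip (l.drop 2)).foldl
      (fun (acc : Int) p => if p.1.1 = p.1.2 ∧ p.1.2 = p.2 then acc + 1 else acc) 0 = pvTC l := by
  induction l with
  | nil => simp [pvTC]
  | cons a l ih =>
    match l with
    | [] => simp [pvTC]
    | [b] => simp [pvTC]
    | b :: c :: r =>
      simp only [List.drop_succ_cons, List.drop_zero, List.zip_cons_cons, List.foldl_cons] at ih ⊢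
      rw [pvFold_shift, ih]
      simp only [pvTC]
      split_ifs <;> ring

-- The list-level statement of the claim.
theorem pvMain (l : List Char) :
    (match l with
     | [] => (0 : Int)
     | c :: rest =>
       let st := rest.foldl
         (fun (st : Int × Char × Int) ch =>
           if ch = st.2.1 then (st.1, st.2.1, st.2.2 + 1)
           else ((if st.2.2 ≥ 3 then st.1 + (st.2.2 - 2) * 2 else st.1), ch, 1))
         (0, c, 1)
       if st.2.2 ≥ 3 then st.1 + (st.2.2 - 2) * 2 else st.1)
    = 2 * ((l.zip (l.drop 1)).zip (l.drop 2)).foldl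
        (fun (acc : Int) p => if p.1.1 = p.1.2 ∧ p.1.2 = p.2 then acc + 1 else acc) 0 := by
  cases l with
  | nil => simp
  | cons c rest =>
    simp only
    rw [pvLoop_eq rest 0 c 1 (by omega), pvZip_tc]
    have h2 : decide ((1:Int) ≥ 2) = false := by decide
    rw [h2, pvW_false]
    norm_num

-- ===== VERDICT (by name: the statement is the Claim_ definition above) =====
theorem penalty_for_repeated_sequences_py_spec : Claim_equal_penalty_for_repeated_sequences_py := by
  intro password _
  unfold Spec_penalty_for_repeated_sequences_py
  exact pvMain password.toList
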